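-- pv_equiv track=rewrite | github.com/mablin7/nitroplast | experiments/utp_consensus_structure/05_analyze_individual_structures.py | find_helices
-- ===== SOURCE A (Python) =====
-- def find_helices(ss_list):
--     """Find helical regions in SS assignment."""
--     helices = []
--     i = 0
--     while i < len(ss_list):
--         if ss_list[i] in ["H", "G"]:
--             start = i
--             while i < len(ss_list) and ss_list[i] in ["H", "G"]:
--                 i += 1
--             helices.append((start + 1, i))  # 1-indexed
--         else:
--             i += 1
--     return helices
-- ===== SOURCE B (Python) =====
-- def find_helices(ss_list):
--     """Find helical regions via boundary detection on a helix mask."""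
--     mask = [s in ("H", "G") for s in ss_list]
--     starts = [i for i, (cur, prv) in enumerate(zip(mask, [False] + mask)) if cur and not prv]
--     ends = [i for i, (cur, nxt) in enumerate(zip(mask, mask[1:] + [False])) if cur and not nxt]
--     return [(s + 1, e + 1) for s, e in zip(starts, ends)]
-- ===== Notes on version B (the rewrite author's own statement) =====
-- stated objective: alternative
-- what changed: Replaced A's nested run-consuming index walk (outer while plus inner while advancing i through each run) by a staged boundary-detection pipeline: build a boolean helix mask, extract run starts and run ends as the positions where the mask turns on/off (zipping the mask with its shifted copies), and zip starts with ends.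
import Mathlib
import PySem

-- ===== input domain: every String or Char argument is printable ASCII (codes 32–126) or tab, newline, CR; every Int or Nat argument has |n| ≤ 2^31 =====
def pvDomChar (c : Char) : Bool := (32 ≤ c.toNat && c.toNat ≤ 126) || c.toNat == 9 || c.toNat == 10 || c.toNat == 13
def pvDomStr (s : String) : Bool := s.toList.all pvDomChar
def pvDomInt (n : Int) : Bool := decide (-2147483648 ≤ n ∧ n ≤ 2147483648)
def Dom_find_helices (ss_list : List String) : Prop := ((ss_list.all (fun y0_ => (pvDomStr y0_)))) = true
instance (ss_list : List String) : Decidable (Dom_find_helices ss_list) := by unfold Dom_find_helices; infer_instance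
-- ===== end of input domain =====

-- B replaces A's nested run-consuming index walk by a staged boundary-detection pipeline:
-- build a helix mask, read off run starts (helix with non-helix predecessor) and run ends
-- (helix with non-helix successor) from zips of the mask with its shifts, and zip them up.
-- Objective: alternative algorithm (boundary detection vs run scanning), same O(n) cost.

-- `s in ("H", "G")` (used by both Pythons)
def pvIsHG (s : String) : Bool := ["H", "G"].contains s

-- ===== PORT A =====
-- A's inner `while i < len(ss_list) and ss_list[i] in ["H","G"]: i += 1`,
-- as structural recursion on the not-yet-scanned suffix with the index i carried along.
def find_helices_inner (l : List String) (i : Nat) : Nat × List String :=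
  match l with
  | [] => (i, [])
  | s :: rest => if pvIsHG s then find_helices_inner rest (i + 1) else (i, s :: rest)

-- cited by the outer loop's decreasing_by
theorem find_helices_inner_eq (l : List String) (i : Nat) :
    find_helices_inner l i = (i + (l.takeWhile pvIsHG).length, l.dropWhile pvIsHG) := by
  induction l generalizing i with
  | nil => simp [find_helices_inner]
  | cons s rest ih =>
      by_cases h : pvIsHG s
      · simp [find_helices_inner, h, ih]
        omega
      · simp [find_helices_inner, h]

-- A's outer while loop over index i, appending (start+1, i) after each helical run.
def find_helices_loop (l : List String) (i : Nat) (acc : List (Int × Int)) : List (Int × Int) :=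
  match l with
  | [] => acc
  | s :: rest =>
    if h : pvIsHG s then
      let p := find_helices_inner (s :: rest) i
      find_helices_loop p.2 p.1 (acc ++ [((i : Int) + 1, (p.1 : Int))])
    else
      find_helices_loop rest (i + 1) acc
termination_by l.length
decreasing_by
  · simp [find_helices_inner_eq, h]
    have := List.length_dropWhile_le pvIsHG rest
    omega
  · simp

def find_helices (ss_list : List String) : List (Int × Int) :=
  find_helices_loop ss_list 0 []

-- ===== PORT B =====
-- B: mask = [s in ("H","G") for s in ss_list];
--    starts = [i for i,(cur,prv) in enumerate(zip(mask, [False]+mask)) if cur and not prv]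
--    ends   = [i for i,(cur,nxt) in enumerate(zip(mask, mask[1:]+[False])) if cur and not nxt]
--    return [(s+1, e+1) for s,e in zip(starts, ends)]
def find_helices_alt (ss_list : List String) : List (Int × Int) :=
  let mask := ss_list.map (fun s => pvIsHG s)
  let starts := ((PySem.List.enumerate (mask.zip (false :: mask)) 0).filter
      (fun p => p.2.1 && !p.2.2)).map (fun p => p.1)
  let ends := ((PySem.List.enumerate (mask.zip (PySem.List.slice mask (some 1) none ++ [false])) 0).filter
      (fun p => p.2.1 && !p.2.2)).map (fun p => p.1)
  (starts.zip ends).map (fun p => (p.1 + 1, p.2 + 1))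

-- ===== PRECONDITION & SPEC =====
def Spec_find_helices (ss_list : List String) (out : List (Int × Int)) : Prop := out = find_helices_alt ss_list
instance (ss_list : List String) (out : List (Int × Int)) : Decidable (Spec_find_helices ss_list out) := by unfold Spec_find_helices; infer_instance

-- ===== CLAIM (what is proved, stated in full; the proofs are below) =====
def Claim_equal_find_helices : Prop := ∀ (ss_list : List String), Dom_find_helices ss_list → Spec_find_helices ss_list (find_helices ss_list)

-- ===== LEMMAS AND PROOFS =====

-- Recursive characterization of B's `starts` list: positions i with mask[i] ∧ ¬mask[i-1],
-- where `prev` is the element in front of the current suffix.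
def startsR (prev : Bool) (m : List Bool) : List Int :=
  match m with
  | [] => []
  | b :: t => (if b && !prev then [(0 : Int)] else []) ++ (startsR b t).map (· + 1)

-- Recursive characterization of B's `ends` list: positions i with mask[i] ∧ ¬mask[i+1].
def endsR (m : List Bool) : List Int :=
  match m with
  | [] => []
  | b :: t => (if b && !(t.headD false) then [(0 : Int)] else []) ++ (endsR t).map (· + 1)

theorem starts_bridge (m : List Bool) (prev : Bool) (k : Int) :
    ((PySem.List.enumerate (m.zip (prev :: m)) k).filter
        (fun p => p.2.1 && !p.2.2)).map (fun p => p.1)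
      = (startsR prev m).map (fun n => k + n) := by
  induction m generalizing prev k with
  | nil => simp [startsR]
  | cons b t ih =>
      by_cases h : b && !prev <;>
        simp [startsR, PySem.List.enumerate_cons, h, ih, List.map_map, Function.comp_def] <;>
        (intro n _ ; ring)

theorem ends_bridge (m : List Bool) (k : Int) :
    ((PySem.List.enumerate (m.zip (m.drop 1 ++ [false])) k).filter
        (fun p => p.2.1 && !p.2.2)).map (fun p => p.1)
      = (endsR m).map (fun n => k + n) := by
  induction m generalizing k with
  | nil => simp [endsR]
  | cons b t ih =>
      match t with
      | [] =>
          by_cases h : b = true <;> simp [endsR, PySem.List.enumerate_cons, h]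
      | c :: t' =>
          have hz : (b :: c :: t').zip ((b :: c :: t').drop 1 ++ [false])
              = (b, c) :: ((c :: t').zip ((c :: t').drop 1 ++ [false])) := by simp
          have he : endsR (b :: c :: t')
              = (if b && !c then [(0 : Int)] else []) ++ (endsR (c :: t')).map (· + 1) := rfl
          have ht : (c :: t').zip (t' ++ [false])
              = (c :: t').zip (List.drop 1 (c :: t') ++ [false]) := rfl
          rw [hz, PySem.List.enumerate_cons, List.filter_cons, he]
          by_cases h : b && !c <;>
            simp [h, List.map_map, Function.comp_def] <;>
            (rw [ht, ih]; exact List.map_congr_left (fun n _ => by ring))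

-- startsR across a (possibly empty) helical run it sits inside/behind
theorem startsR_run (m : List Bool) :
    startsR true m
      = (startsR false (m.dropWhile id)).map (fun n => n + ((m.takeWhile id).length : Int)) := by
  induction m with
  | nil => simp [startsR]
  | cons b t ih =>
      by_cases h : b = true
      · subst h
        simp [startsR, List.takeWhile_cons, List.dropWhile_cons, ih, List.map_map,
          Function.comp_def]
        intro n _; ring
      · have hb : b = false := by simpa using h
        subst hb
        simp [startsR, List.takeWhile_cons, List.dropWhile_cons]

-- endsR across the leading helical run
theorem endsR_run (m : List Bool) :
    endsR m
      = (if (m.takeWhile id).length = 0 then [] else [((m.takeWhile id).length : Int) - 1])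
        ++ (endsR (m.dropWhile id)).map (fun n => n + ((m.takeWhile id).length : Int)) := by
  induction m with
  | nil => simp [endsR]
  | cons b t ih =>
      by_cases h : b = true
      · subst h
        match t with
        | [] => simp [endsR]
        | c :: t' =>
            by_cases hc : c = true
            · subst hc
              rw [show endsR (true :: true :: t') = (endsR (true :: t')).map (· + 1) by
                simp [endsR]]
              rw [ih]
              have h1 : ((true :: true :: t').takeWhile id).length
                  = ((true :: t').takeWhile id).length + 1 := by simp [List.takeWhile_cons]
              have h0 : ((true :: t').takeWhile id).length ≠ 0 := by simp [List.takeWhile_cons]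
              have h2 : (true :: true :: t').dropWhile id = (true :: t').dropWhile id := by
                simp [List.dropWhile_cons]
              rw [h1, h2]
              simp [h0, List.map_map, Function.comp_def]
              intro a _; push_cast; ring
            · have hc' : c = false := by simpa using hc
              subst hc'
              simp [endsR, List.takeWhile_cons, List.dropWhile_cons]
      · have hb : b = false := by simpa using h
        subst hb
        simp [List.takeWhile_cons, List.dropWhile_cons]
-- the common value: zipped (start, end) pairs of l's helical runs, 1-indexed, shifted by i
def pvSpans (l : List String) (i : Int) : List (Int × Int) :=
  ((startsR false (l.map pvIsHG)).zip (endsR (l.map pvIsHG))).map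
    (fun p => (i + p.1 + 1, i + p.2 + 1))


-- pvSpans at the head of a helical run: one span for the run, then the rest shifted past it
theorem pvSpans_cons_true (s : String) (tl : List String) (i : Int) (h : pvIsHG s = true) :
    pvSpans (s :: tl) i
      = (i + 1, i + ((tl.takeWhile pvIsHG).length : Int) + 1)
        :: pvSpans (tl.dropWhile pvIsHG) (i + ((tl.takeWhile pvIsHG).length : Int) + 1) := by
  have hmt_t : (tl.map pvIsHG).takeWhile id = (tl.takeWhile pvIsHG).map pvIsHG := by
    rw [List.takeWhile_map, Function.id_comp]
  have hmt_d : (tl.map pvIsHG).dropWhile id = (tl.dropWhile pvIsHG).map pvIsHG := by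
    rw [List.dropWhile_map, Function.id_comp]
  have hs : startsR false ((s :: tl).map pvIsHG)
      = 0 :: (startsR true (tl.map pvIsHG)).map (· + 1) := by
    simp [startsR, h]
  have hlen0 : ((true :: tl.map pvIsHG).takeWhile id).length
      = (tl.takeWhile pvIsHG).length + 1 := by
    simp [List.takeWhile_cons, hmt_t]
  have hdrop0 : (true :: tl.map pvIsHG).dropWhile id = (tl.dropWhile pvIsHG).map pvIsHG := by
    simp [List.dropWhile_cons, hmt_d]
  have he : endsR ((s :: tl).map pvIsHG)
      = (((tl.takeWhile pvIsHG).length : Int) + 1 - 1)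
        :: (endsR ((tl.dropWhile pvIsHG).map pvIsHG)).map
            (fun n => n + (((tl.takeWhile pvIsHG).length : Int) + 1)) := by
    rw [List.map_cons, h, endsR_run (true :: tl.map pvIsHG), hlen0, hdrop0]
    simp
  rw [pvSpans, hs, startsR_run, hmt_t, hmt_d, he]
  simp only [List.length_map, List.map_map, Function.comp_def, List.zip_cons_cons,
    List.zip_map, List.map_cons, pvSpans]
  refine List.cons_eq_cons.mpr ⟨?_, ?_⟩
  · rw [Prod.ext_iff]; constructor <;> (push_cast; ring_nf)
  · exact List.map_congr_left (fun p _ => by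
      rw [Prod.ext_iff]; constructor <;> (simp [Prod.map]; ring))

theorem loop_eq_spans (n : Nat) : ∀ (l : List String), l.length ≤ n →
    ∀ (i : Nat) (acc : List (Int × Int)),
      find_helices_loop l i acc = acc ++ pvSpans l (i : Int) := by
  induction n with
  | zero =>
      intro l hl i acc
      have : l = [] := List.eq_nil_of_length_eq_zero (Nat.le_zero.mp hl)
      subst this
      simp [find_helices_loop, pvSpans, startsR, endsR]
  | succ n ih =>
      intro l hl i acc
      match l with
      | [] => simp [find_helices_loop, pvSpans, startsR, endsR]
      | s :: tl =>
          by_cases h : pvIsHG s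
          · rw [show find_helices_loop (s :: tl) i acc
                  = find_helices_loop (find_helices_inner (s :: tl) i).2 (find_helices_inner (s :: tl) i).1
                      (acc ++ [((i : Int) + 1, ((find_helices_inner (s :: tl) i).1 : Int))]) by
                rw [find_helices_loop]; simp [h]]
            rw [find_helices_inner_eq]
            dsimp only
            rw [show (s :: tl).dropWhile pvIsHG = tl.dropWhile pvIsHG by simp [h]]
            rw [ih _ (by have := List.length_dropWhile_le pvIsHG tl; simp at hl; omega)]
            rw [pvSpans_cons_true s tl (i : Int) h]
            rw [show (s :: tl).takeWhile pvIsHG = s :: tl.takeWhile pvIsHG by simp [h]]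
            simp only [List.length_cons, List.append_assoc, List.singleton_append]
            congr 2 <;> push_cast <;> ring
          · rw [show find_helices_loop (s :: tl) i acc = find_helices_loop tl (i + 1) acc by
                rw [find_helices_loop]; simp [h]]
            rw [ih _ (by simp at hl; omega)]
            congr 1
            simp [pvSpans, startsR, endsR, h, List.zip_map, List.map_map, Function.comp_def]
            intro a b _; constructor <;> ring

-- ===== VERDICT (by name: the statement is the Claim_ definition above) =====
theorem find_helices_spec : Claim_equal_find_helices := by
  intro ss_list _
  unfold Spec_find_helices find_helices find_helices_alt
  dsimp only
  rw [loop_eq_spans ss_list.length ss_list le_rfl 0 [], PySem.List.slice_from,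
    starts_bridge]
  simp only [Int.toNat_one]
  rw [ends_bridge]
  simp [pvSpans]
  norm_num
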